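-- pv_equiv track=rewrite | github.com/Claw-Eval-Live/Claw-Eval-Live | tasks/CTB_A03_cashflow_risk_memo/grader.py | _month_window
-- ===== SOURCE A (Python) =====
-- def _month_window(text: str, labels: list[str]) -> str:
--     lines = text.splitlines()
--     for line in lines:
--         lower = line.lower()
--         if "|" in line and any(label in lower for label in labels):
--             return lower
--     for idx, line in enumerate(lines):
--         lower = line.lower()
--         if any(label in lower for label in labels):
--             start = max(0, idx - 1)
--             end = min(len(lines), idx + 4)
--             return " ".join(lines[start:end]).lower()
--     return text.lower()
-- ===== SOURCE B (Python) =====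
-- def _month_window(text: str, labels: list[str]) -> str:
--     lines = text.splitlines()
--     label_idx = None
--     for idx, line in enumerate(lines):
--         lower = line.lower()
--         if any(label in lower for label in labels):
--             if "|" in line:
--                 return lower
--             if label_idx is None:
--                 label_idx = idx
--     if label_idx is not None:
--         start = max(0, label_idx - 1)
--         end = min(len(lines), label_idx + 4)
--         return " ".join(lines[start:end]).lower()
--     return text.lower()
-- ===== Notes on version B (the rewrite author's own statement) =====
-- stated objective: simpler
-- what changed: B replaces A's two full scans over the lines (one for a pipe+label line, then a second for any label line) with a single pass that returns a pipe+label line immediately and merely records the first label-line index for the fallback window.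
import Mathlib
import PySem

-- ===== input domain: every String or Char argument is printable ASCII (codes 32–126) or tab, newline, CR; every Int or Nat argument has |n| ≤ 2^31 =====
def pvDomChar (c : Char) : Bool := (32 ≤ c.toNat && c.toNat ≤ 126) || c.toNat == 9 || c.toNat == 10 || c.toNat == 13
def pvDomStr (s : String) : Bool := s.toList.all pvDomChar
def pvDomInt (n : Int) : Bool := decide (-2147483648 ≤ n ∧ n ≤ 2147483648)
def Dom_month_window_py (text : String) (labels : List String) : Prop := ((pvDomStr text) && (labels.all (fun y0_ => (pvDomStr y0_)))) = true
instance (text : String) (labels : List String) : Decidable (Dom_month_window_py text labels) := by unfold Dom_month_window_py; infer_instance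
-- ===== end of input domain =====

-- B merges A's two scans into a single pass that returns a pipe+label line immediately and only
-- records the first label index for the fallback window; objective: simpler single-pass decomposition.

-- shared helper: " ".join(lines[max(0,i-1):min(len(lines),i+4)]).lower()
def pvWindow (allLines : List String) (i : Int) : String :=
  PySem.Str.lower (PySem.Str.join " "
    (PySem.List.slice allLines (some (max 0 (i - 1))) (some (min (allLines.length : Int) (i + 4)))))

-- ===== PORT A =====
-- first loop of A: return the first line containing "|" whose lowering contains a label
def pvA_loop1 (labels : List String) (lines : List String) : Option String :=
  match lines with
  | [] => none
  | line :: rest =>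
    let lower := PySem.Str.lower line
    if PySem.Str.isIn "|" line && labels.any (fun label => PySem.Str.isIn label lower) then
      some lower
    else pvA_loop1 labels rest

-- second loop of A: first label-containing line gives the joined window
def pvA_loop2 (allLines : List String) (labels : List String) (lines : List String) (idx : Int) : Option String :=
  match lines with
  | [] => none
  | line :: rest =>
    let lower := PySem.Str.lower line
    if labels.any (fun label => PySem.Str.isIn label lower) then
      some (pvWindow allLines idx)
    else pvA_loop2 allLines labels rest (idx + 1)

def month_window_py (text : String) (labels : List String) : String :=
  let lines := PySem.Str.splitlines text
  match pvA_loop1 labels lines with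
  | some s => s
  | none =>
    match pvA_loop2 lines labels lines 0 with
    | some s => s
    | none => PySem.Str.lower text

-- ===== PORT B =====
-- single pass: early return on pipe+label line; otherwise record first label index
def pvB_loop (allLines : List String) (labels : List String) (text : String)
    (lines : List String) (idx : Int) (labelIdx : Option Int) : String :=
  match lines with
  | [] =>
    match labelIdx with
    | some i => pvWindow allLines i
    | none => PySem.Str.lower text
  | line :: rest =>
    let lower := PySem.Str.lower line
    if labels.any (fun label => PySem.Str.isIn label lower) then
      if PySem.Str.isIn "|" line then lower
      else
        pvB_loop allLines labels text rest (idx + 1)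
          (match labelIdx with | none => some idx | some i => some i)
    else pvB_loop allLines labels text rest (idx + 1) labelIdx

def month_window_py_alt (text : String) (labels : List String) : String :=
  let lines := PySem.Str.splitlines text
  pvB_loop lines labels text lines 0 none

-- ===== PRECONDITION & SPEC =====
def Spec_month_window_py (text : String) (labels : List String) (out : String) : Prop := out = month_window_py_alt text labels
instance (text : String) (labels : List String) (out : String) : Decidable (Spec_month_window_py text labels out) := by unfold Spec_month_window_py; infer_instance

-- ===== CLAIM (what is proved, stated in full; the proofs are below) =====
def Claim_equal_month_window_py : Prop := ∀ (text : String) (labels : List String), Dom_month_window_py text labels → Spec_month_window_py text labels (month_window_py text labels)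

-- ===== LEMMAS AND PROOFS =====
theorem pvB_loop_eq (allLines labels : List String) (text : String) :
    ∀ (lines : List String) (idx : Int) (labelIdx : Option Int),
    pvB_loop allLines labels text lines idx labelIdx =
      match pvA_loop1 labels lines with
      | some s => s
      | none =>
        match labelIdx with
        | some i => pvWindow allLines i
        | none =>
          match pvA_loop2 allLines labels lines idx with
          | some s => s
          | none => PySem.Str.lower text := by
  intro lines
  induction lines with
  | nil => intro idx labelIdx; cases labelIdx <;> rfl
  | cons line rest ih =>
    intro idx labelIdx
    by_cases hL : labels.any (fun label => PySem.Str.isIn label (PySem.Str.lower line)) = true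
    · by_cases hP : PySem.Str.isIn "|" line = true
      · simp only [pvB_loop, pvA_loop1, hL, hP, Bool.true_and, reduceIte]
      · simp only [Bool.not_eq_true] at hP
        simp only [pvB_loop, pvA_loop1, pvA_loop2, hL, hP, Bool.false_and, reduceIte, ih]
        cases labelIdx <;> cases pvA_loop1 labels rest <;> rfl
    · simp only [Bool.not_eq_true] at hL
      simp only [pvB_loop, pvA_loop1, pvA_loop2, hL, Bool.and_false, ih]
      rfl
-- ===== VERDICT (by name: the statement is the Claim_ definition above) =====
theorem month_window_py_spec : Claim_equal_month_window_py := by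
  intro text labels _
  unfold Spec_month_window_py month_window_py month_window_py_alt
  rw [pvB_loop_eq]
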